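-- pv_equiv track=rewrite | github.com/Suriya-Veeran/Archon-OCR-Project | main/utils.py | get_position_values
-- ===== SOURCE A (Python) =====
-- def get_position_values(bbox):
--     x_coords = [point[0] for point in bbox]
--     y_coords = [point[1] for point in bbox]
--
--     width_position = int(max(x_coords) - min(x_coords))
--     height_position = int(max(y_coords) - min(y_coords))
--     top_position = int(min(y_coords))
--     left_position = int(min(x_coords))
--     return width_position, height_position, top_position, left_position
-- ===== SOURCE B (Python) =====
-- def get_position_values(bbox):
--     x0, y0 = bbox[0]
--     min_x = max_x = x0
--     min_y = max_y = y0
--     for x, y in bbox[1:]: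
--         if x < min_x:
--             min_x = x
--         if x > max_x:
--             max_x = x
--         if y < min_y:
--             min_y = y
--         if y > max_y:
--             max_y = y
--     return int(max_x - min_x), int(max_y - min_y), int(min_y), int(min_x)
-- ===== Notes on version B (the rewrite author's own statement) =====
-- stated objective: alternative
-- what changed: Replaces the two coordinate-projection list comprehensions plus four separate min/max scans with one single pass over bbox maintaining running min_x/max_x/min_y/max_y; Pre_ excludes the empty bbox, on which A raises ValueError (max of empty sequence) and B raises IndexError.
import Mathlib
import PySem

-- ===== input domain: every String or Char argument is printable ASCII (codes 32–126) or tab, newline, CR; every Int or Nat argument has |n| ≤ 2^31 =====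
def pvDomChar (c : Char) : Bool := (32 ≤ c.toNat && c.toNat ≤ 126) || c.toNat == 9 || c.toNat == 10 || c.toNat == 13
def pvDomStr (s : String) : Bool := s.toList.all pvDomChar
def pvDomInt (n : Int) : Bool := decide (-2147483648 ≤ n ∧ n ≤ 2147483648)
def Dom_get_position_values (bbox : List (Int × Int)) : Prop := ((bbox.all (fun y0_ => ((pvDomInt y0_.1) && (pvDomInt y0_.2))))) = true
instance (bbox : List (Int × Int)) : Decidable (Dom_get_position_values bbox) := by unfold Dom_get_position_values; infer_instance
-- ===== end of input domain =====

-- B replaces A's two projection comprehensions and four min/max scans with one single pass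
-- maintaining running min_x/max_x/min_y/max_y (objective: alternative decomposition).

-- ===== PORT A =====
-- literal port: build x_coords/y_coords, then max/min of each (Python max/min raise on [],
-- so the PySem primitives return none there; that case is excluded by Pre_ and gets a dummy value)
def get_position_values (bbox : List (Int × Int)) : Int × Int × Int × Int :=
  let x_coords := bbox.map (fun point => point.1)
  let y_coords := bbox.map (fun point => point.2)
  match PySem.List.max? x_coords (fun v => v), PySem.List.min? x_coords (fun v => v),
        PySem.List.max? y_coords (fun v => v), PySem.List.min? y_coords (fun v => v) with
  | some mxx, some mnx, some mxy, some mny => (mxx - mnx, mxy - mny, mny, mnx)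
  | _, _, _, _ => (0, 0, 0, 0)  -- unreachable under Pre_ (empty bbox: Python raises ValueError)

-- ===== PORT B =====
-- single fold over bbox[1:] with state (min_x, max_x, min_y, max_y) seeded from bbox[0]
def gpvStep (st : Int × Int × Int × Int) (p : Int × Int) : Int × Int × Int × Int :=
  let mnx := if p.1 < st.1 then p.1 else st.1
  let mxx := if p.1 > st.2.1 then p.1 else st.2.1
  let mny := if p.2 < st.2.2.1 then p.2 else st.2.2.1
  let mxy := if p.2 > st.2.2.2 then p.2 else st.2.2.2
  (mnx, mxx, mny, mxy)

def get_position_values_alt (bbox : List (Int × Int)) : Int × Int × Int × Int :=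
  match bbox with
  | [] => (0, 0, 0, 0)  -- unreachable under Pre_ (Python B raises IndexError on bbox[0])
  | (x0, y0) :: rest =>
    let s := rest.foldl gpvStep (x0, x0, y0, y0)
    (s.2.1 - s.1, s.2.2.2 - s.2.2.1, s.2.2.1, s.1)

-- ===== PRECONDITION & SPEC =====
-- Pre_ excludes the empty bbox: there Python A raises ValueError (max of empty sequence).
def Pre_get_position_values (bbox : List (Int × Int)) : Prop := bbox ≠ []
instance (bbox : List (Int × Int)) : Decidable (Pre_get_position_values bbox) := by unfold Pre_get_position_values; infer_instance
def pvWitness_get_position_values : (List (Int × Int)) := [(1, 2), (4, 0)]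

def Spec_get_position_values (bbox : List (Int × Int)) (out : Int × Int × Int × Int) : Prop := out = get_position_values_alt bbox
instance (bbox : List (Int × Int)) (out : Int × Int × Int × Int) : Decidable (Spec_get_position_values bbox out) := by unfold Spec_get_position_values; infer_instance

-- ===== CLAIM (what is proved, stated in full; the proofs are below) =====
def Claim_equal_get_position_values : Prop := ∀ (bbox : List (Int × Int)), Dom_get_position_values bbox → Pre_get_position_values bbox → Spec_get_position_values bbox (get_position_values bbox)

-- ===== LEMMAS AND PROOFS =====

-- B's 4-tuple fold is the 4 componentwise min/max folds
theorem gpv_foldl_split (rest : List (Int × Int)) (a b c d : Int) :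
    rest.foldl gpvStep (a, b, c, d) =
      (rest.foldl (fun m p => min m p.1) a,
       rest.foldl (fun m p => max m p.1) b,
       rest.foldl (fun m p => min m p.2) c,
       rest.foldl (fun m p => max m p.2) d) := by
  induction rest generalizing a b c d with
  | nil => rfl
  | cons p t ih =>
    have h1 : (if p.1 < a then p.1 else a) = min a p.1 := by split_ifs <;> omega
    have h2 : (if p.1 > b then p.1 else b) = max b p.1 := by split_ifs <;> omega
    have h3 : (if p.2 < c then p.2 else c) = min c p.2 := by split_ifs <;> omega
    have h4 : (if p.2 > d then p.2 else d) = max d p.2 := by split_ifs <;> omega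
    simp only [List.foldl_cons, gpvStep, h1, h2, h3, h4, ih]

theorem get_position_values_spec' (x0 y0 : Int) (rest : List (Int × Int)) :
    get_position_values ((x0, y0) :: rest) = get_position_values_alt ((x0, y0) :: rest) := by
  simp only [get_position_values, get_position_values_alt, List.map_cons,
    PySem.List.max?_id_cons, PySem.List.min?_id_cons, gpv_foldl_split,
    List.foldl_map]

-- ===== VERDICT (by name: the statement is the Claim_ definition above) =====
theorem get_position_values_spec : Claim_equal_get_position_values := by
  intro bbox _ hpre
  unfold Spec_get_position_values
  match bbox with
  | [] => exact absurd rfl hpre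
  | (x0, y0) :: rest => exact get_position_values_spec' x0 y0 rest
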